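-- pv_equiv track=rewrite | github.com/sinboleto/chatbot_KIA | app.py | compare_sentence_with_list
-- ===== SOURCE A (Python) =====
-- from itertools import combinations
--
-- def get_word_combinations(sentence):
--     combinations_list = []
--     word_list = sentence.split()
--
--     for r in range(1, len(word_list) + 1):
--         combinations_list.extend(combinations(word_list, r))
--
--     combinations_list = [' '.join(t) for t in combinations_list]
--
--     return combinations_list
--
-- def compare_sentence_with_list(sentence, word_list):
--
--     if sentence in word_list:
--         return True
--
--     sentence_words = get_word_combinations(sentence)
--     # sentence_words = sentence.split()
--
--     for word in sentence_words:
--         if word in word_list: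
--             return True
--
--     return False
-- ===== SOURCE B (Python) =====
-- def compare_sentence_with_list(sentence, word_list):
--     words = sentence.split()
--
--     def is_match(entry):
--         if entry == sentence:
--             return True
--         it = iter(words)
--         # entry matches iff its space-separated parts occur, in order, among
--         # the sentence's words ('x in it' consumes the iterator up to the match)
--         return all(part in it for part in entry.split(' '))
--
--     return any(is_match(entry) for entry in word_list)
-- ===== Notes on version B (the rewrite author's own statement) =====
-- stated objective: alternative
-- what changed: Instead of materialising every ' '-joined combination of the sentence's words and testing each for membership in word_list, B tests, for each word_list entry, whether the entry equals the sentence or its ' '-split parts form an in-order subsequence of the sentence's words via one greedy iterator scan.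
import Mathlib
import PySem

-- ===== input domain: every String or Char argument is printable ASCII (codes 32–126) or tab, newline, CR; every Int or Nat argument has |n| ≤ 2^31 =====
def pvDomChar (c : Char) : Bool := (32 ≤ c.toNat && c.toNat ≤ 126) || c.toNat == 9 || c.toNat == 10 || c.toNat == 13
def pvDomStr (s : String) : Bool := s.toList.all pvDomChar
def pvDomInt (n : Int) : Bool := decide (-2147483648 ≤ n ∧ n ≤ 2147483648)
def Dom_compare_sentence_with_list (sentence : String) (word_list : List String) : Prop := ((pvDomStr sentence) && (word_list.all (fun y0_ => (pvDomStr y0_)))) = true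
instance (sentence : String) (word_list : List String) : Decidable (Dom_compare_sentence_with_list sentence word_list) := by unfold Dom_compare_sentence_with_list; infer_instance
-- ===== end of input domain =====

-- Alternative algorithm: B tests each word_list entry directly (equality with the sentence, or its ' '-split parts being an in-order subsequence of the sentence's words) instead of A's enumeration of all joined word combinations.


-- ===== PORT A =====
-- helper of A: all ' '-joined combinations (r = 1 .. len) of the sentence's words
def get_word_combinations (sentence : String) : List String :=
  let word_list := PySem.Str.split₀ sentence
  let combinations_list :=
    (PySem.List.pyRange 1 ((word_list.length : Int) + 1)).foldl
      (fun acc r => acc ++ PySem.List.combinations word_list r.toNat) []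
  combinations_list.map (fun t => PySem.Str.join " " t)

def compare_sentence_with_list (sentence : String) (word_list : List String) : Bool :=
  if word_list.contains sentence then true
  else
    let sentence_words := get_word_combinations sentence
    sentence_words.any (fun word => word_list.contains word)

-- ===== PORT B =====
-- 'all(part in it for part in parts)' over the iterator on `words`: each 'part in it'
-- consumes the iterator up to and including the first element equal to part.
def pvAllIn : List String → List String → Bool
  | [], _ => true
  | _ :: _, [] => false
  | p :: ps, w :: ws => if w == p then pvAllIn ps ws else pvAllIn (p :: ps) ws

def compare_sentence_with_list_alt (sentence : String) (word_list : List String) : Bool :=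
  let words := PySem.Str.split₀ sentence
  word_list.any (fun entry =>
    entry == sentence || pvAllIn ((PySem.Str.split? entry " ").getD []) words)

-- ===== PRECONDITION & SPEC =====
def Spec_compare_sentence_with_list (sentence : String) (word_list : List String) (out : Bool) : Prop := out = compare_sentence_with_list_alt sentence word_list
instance (sentence : String) (word_list : List String) (out : Bool) : Decidable (Spec_compare_sentence_with_list sentence word_list out) := by unfold Spec_compare_sentence_with_list; infer_instance

-- ===== CLAIM (what is proved, stated in full; the proofs are below) =====
def Claim_equal_compare_sentence_with_list : Prop := ∀ (sentence : String) (word_list : List String), Dom_compare_sentence_with_list sentence word_list → Spec_compare_sentence_with_list sentence word_list (compare_sentence_with_list sentence word_list)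

-- ===== LEMMAS AND PROOFS =====

-- every word produced by str.split() is nonempty and whitespace-free
theorem split₀_go_clean (l : List Char) : ∀ (cur : List Char) (acc : List (List Char)),
    (∀ w ∈ acc, w ≠ [] ∧ ∀ c ∈ w, PySem.Chars.isspace c = false) →
    (∀ c ∈ cur, PySem.Chars.isspace c = false) →
    ∀ w ∈ PySem.Chars.split₀.go l cur acc, w ≠ [] ∧ ∀ c ∈ w, PySem.Chars.isspace c = false := by
  induction l with
  | nil =>
    intro cur acc hacc hcur w hw
    simp only [PySem.Chars.split₀.go] at hw
    split at hw
    · exact hacc w (by simpa using hw)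
    · rename_i hne
      rcases (by simpa using hw : w ∈ acc ∨ w = cur.reverse) with h | h
      · exact hacc w h
      · subst h
        refine ⟨by simpa using hne, ?_⟩
        intro c hc; exact hcur c (by simpa using hc)
  | cons a rest ih =>
    intro cur acc hacc hcur w hw
    simp only [PySem.Chars.split₀.go] at hw
    split at hw
    · rename_i hsp
      split at hw
      · exact ih [] acc hacc (by simp) w hw
      · rename_i hne
        refine ih [] (cur.reverse :: acc) ?_ (by simp) w hw
        intro v hv
        rcases List.mem_cons.mp hv with h | h
        · subst h
          refine ⟨by simpa using hne, ?_⟩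
          intro c hc; exact hcur c (by simpa using hc)
        · exact hacc v h
    · rename_i hns
      refine ih (a :: cur) acc hacc ?_ w hw
      intro c hc
      rcases List.mem_cons.mp hc with h | h
      · subst h; simpa using hns
      · exact hcur c h

theorem split₀_clean (cs : List Char) :
    ∀ w ∈ PySem.Chars.split₀ cs, w ≠ [] ∧ ∀ c ∈ w, PySem.Chars.isspace c = false := by
  exact split₀_go_clean cs [] [] (by simp) (by simp)

theorem splitOn_go_single (c : Char) : ∀ (fuel : Nat) (l cur : List Char) (acc : List (List Char)),
    l.length < fuel →
    PySem.Chars.splitOn.go [c] fuel l cur acc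
      = acc.reverse ++ (List.splitOn c l).modifyHead (cur.reverse ++ ·) := by
  intro fuel
  induction fuel with
  | zero => intro l cur acc h; omega
  | succ n ih =>
    intro l cur acc h
    match l with
    | [] =>
      simp [PySem.Chars.splitOn.go, List.splitOn_nil]
    | a :: rest =>
      simp only [PySem.Chars.splitOn.go]
      by_cases hc : c = a
      · subst hc
        rw [if_pos (by simp [List.isPrefixOf])]
        simp only [List.length_singleton, List.drop_succ_cons, List.drop_zero]
        rw [ih rest [] (cur.reverse :: acc) (by simpa using Nat.lt_of_succ_lt_succ h)]
        have : List.splitOn c (c :: rest) = [] :: List.splitOn c rest := by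
          simp [List.splitOn, List.splitOnP_cons]
        rw [this]
        simp
        cases List.splitOn c rest <;> simp
      · rw [if_neg (by simp [List.isPrefixOf, hc])]
        rw [ih rest (a :: cur) acc (by simpa using Nat.lt_of_succ_lt_succ h)]
        have : List.splitOn c (a :: rest) = (List.splitOn c rest).modifyHead (a :: ·) := by
          have hac : (a == c) = false := by simp [Ne.symm hc]
          simp [List.splitOn, List.splitOnP_cons, hac]
        rw [this]
        obtain ⟨hhd, t, ht⟩ : ∃ hd t, List.splitOn c rest = hd :: t := by
          rcases hx : List.splitOn c rest with _ | ⟨hd, t⟩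
          · exact absurd hx (List.splitOnP_ne_nil _ _)
          · exact ⟨hd, t, rfl⟩
        rw [ht]
        simp

theorem splitOn_single (cs : List Char) (c : Char) :
    PySem.Chars.splitOn cs [c] = List.splitOn c cs := by
  rw [PySem.Chars.splitOn, splitOn_go_single c (cs.length + 1) cs [] [] (by omega)]
  cases h : List.splitOn c cs <;> simp


theorem pvAllIn_eq_isSublist (ps ws : List String) : pvAllIn ps ws = ps.isSublist ws := by
  induction ws generalizing ps with
  | nil => cases ps <;> simp [pvAllIn, List.isSublist]
  | cons w ws ih =>
    cases ps with
    | nil => simp [pvAllIn, List.isSublist]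
    | cons p ps =>
      simp only [pvAllIn, List.isSublist]
      by_cases h : p = w
      · subst h; simp [ih]
      · rw [if_neg (by simpa using Ne.symm h), if_neg (by simpa using h), ih]

theorem pvAllIn_iff (ps ws : List String) : pvAllIn ps ws = true ↔ ps.Sublist ws := by
  rw [pvAllIn_eq_isSublist, List.isSublist_iff_sublist]

theorem parts_eq (e : String) :
    (PySem.Str.split? e " ").getD [] = (List.splitOn ' ' e.toList).map String.ofList := by
  simp [PySem.Str.split?, PySem.Chars.split?, splitOn_single]

theorem mem_gwc_iff (s e : String) :
    e ∈ get_word_combinations s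
      ↔ ∃ t, t.Sublist (PySem.Str.split₀ s) ∧ t ≠ [] ∧ PySem.Str.join " " t = e := by
  unfold get_word_combinations
  dsimp only
  rw [PySem.List.foldl_append_eq_flatMap]
  simp only [List.nil_append, List.mem_map, List.mem_flatMap,
    PySem.List.mem_pyRange_one, PySem.List.mem_combinations_iff]
  constructor
  · rintro ⟨t, ⟨r, ⟨hr1, hr2⟩, hsub, hlen⟩, hj⟩
    exact ⟨t, hsub, by intro h; subst h; simp at hlen; omega, hj⟩
  · rintro ⟨t, hsub, hne, hj⟩
    refine ⟨t, ⟨(t.length : Int), ⟨?_, ?_⟩, hsub, by simp⟩, hj⟩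
    · have : t.length ≠ 0 := by simpa using hne
      omega
    · have := hsub.length_le
      omega

theorem mem_cands_iff (s e : String) :
    e ∈ get_word_combinations s
      ↔ pvAllIn ((PySem.Str.split? e " ").getD []) (PySem.Str.split₀ s) = true := by
  rw [mem_gwc_iff, pvAllIn_iff, parts_eq]
  constructor
  · rintro ⟨t, hsub, hne, hj⟩
    have hmem : ∀ x ∈ t, x ∈ PySem.Str.split₀ s := fun x hx => hsub.mem hx
    have hclean : ∀ l ∈ t.map String.toList, ' ' ∉ l := by
      intro l hl
      obtain ⟨x, hx, rfl⟩ := List.mem_map.mp hl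
      obtain ⟨w, hw, rfl⟩ := List.mem_map.mp (by simpa [PySem.Str.split₀] using hmem x hx)
      intro hsp
      have := (split₀_clean s.toList w hw).2 ' ' (by simpa using hsp)
      simp [PySem.Chars.isspace] at this
    have hetl : e.toList = [' '].intercalate (t.map String.toList) := by
      rw [← hj, PySem.Str.toList_join]
      rfl
    have hsplit : List.splitOn ' ' e.toList = t.map String.toList := by
      rw [hetl]
      exact List.splitOn_intercalate _ _ hclean (by simpa using hne)
    have : (List.splitOn ' ' e.toList).map String.ofList = t := by
      rw [hsplit, List.map_map]
      have : (String.ofList ∘ String.toList) = id := by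
        funext x; simp [String.ofList_toList]
      rw [this, List.map_id]
    rw [this]; exact hsub
  · intro hsub
    refine ⟨(List.splitOn ' ' e.toList).map String.ofList, hsub, ?_, ?_⟩
    · simpa using List.splitOnP_ne_nil _ e.toList
    · have htl : (PySem.Str.join " " ((List.splitOn ' ' e.toList).map String.ofList)).toList = e.toList := by
        rw [PySem.Str.toList_join, List.map_map]
        have : (String.toList ∘ String.ofList) = id := by
          funext l; simp [String.toList_ofList]
        rw [this, List.map_id]
        have : PySem.Chars.join " ".toList (List.splitOn ' ' e.toList) = [' '].intercalate (List.splitOn ' ' e.toList) := rfl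
        rw [this, List.intercalate_splitOn]
      exact String.toList_inj.mp htl

theorem main_eq (s : String) (wl : List String) :
    compare_sentence_with_list s wl = compare_sentence_with_list_alt s wl := by
  unfold compare_sentence_with_list compare_sentence_with_list_alt
  dsimp only
  rcases h : wl.contains s with _ | _
  · rw [if_neg (by simp : ¬ false = true)]
    rw [Bool.eq_iff_iff]
    simp only [List.any_eq_true, Bool.or_eq_true, beq_iff_eq]
    constructor
    · rintro ⟨w, hw, hc⟩
      refine ⟨w, by simpa using hc, Or.inr ?_⟩
      exact (mem_cands_iff s w).mp hw
    · rintro ⟨e, he, hor⟩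
      rcases hor with rfl | hall
      · exact absurd he (by simpa using h)
      · exact ⟨e, (mem_cands_iff s e).mpr hall, by simpa using he⟩
  · rw [if_pos (rfl : true = true)]
    rw [Bool.eq_iff_iff]
    simp only [List.any_eq_true, Bool.or_eq_true, beq_iff_eq]
    exact iff_of_true trivial ⟨s, by simpa using h, Or.inl rfl⟩

-- ===== VERDICT (by name: the statement is the Claim_ definition above) =====
theorem compare_sentence_with_list_spec : Claim_equal_compare_sentence_with_list := by
  intro s wl _
  exact (main_eq s wl)
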